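-- pv_equiv track=rewrite | github.com/AdnanSihab/CSE221 | LabSec21_22141026_CSE221LabAssignment06_Fall2023/task3.py | calculate_friend_circle_size
-- ===== SOURCE A (Python) =====
-- def calculate_friend_circle_size(N, friendships):
--     parent = list(range(N + 1))
--     size = [1] * (N + 1)
--     def find_set(x):
--         if parent[x] != x:
--             parent[x] = find_set(parent[x])
--         return parent[x]
--     def union_sets(a, b):
--         root_a = find_set(a)
--         root_b = find_set(b)
--         if root_a != root_b:
--             if size[root_a] < size[root_b]:
--                 root_a, root_b = root_b, root_a
--             parent[root_b] = root_a
--             size[root_a] += size[root_b]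
--     result = []
--     for friendship in friendships:
--         a, b = friendship
--         union_sets(a, b)
--         result.append(size[find_set(a)])
--     return result
-- ===== SOURCE B (Python) =====
-- def calculate_friend_circle_size(N, friendships):
--     # Explicit component representation: comp[x] = group id, members[g] = list of
--     # persons in group g; merge by relocating the smaller group into the larger.
--     comp = list(range(N + 1))
--     members = [[x] for x in range(N + 1)]
--     result = []
--     for a, b in friendships:
--         ga = comp[a]
--         gb = comp[b]
--         if ga != gb:
--             if len(members[ga]) < len(members[gb]):
--                 ga, gb = gb, ga
--             for x in members[gb]:
--                 comp[x] = ga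
--             members[ga] = members[ga] + members[gb]
--             members[gb] = []
--         result.append(len(members[comp[a]]))
--     return result
-- ===== Notes on version B (the rewrite author's own statement) =====
-- stated objective: alternative
-- what changed: Replaces A's union-find (parent-pointer forest with recursive find and path compression) by an explicit component table: comp[x] holds the group id and members[g] the group's member list, merging the smaller group into the larger by relocating its members, so no find/parent chasing exists at all.
import Mathlib
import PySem

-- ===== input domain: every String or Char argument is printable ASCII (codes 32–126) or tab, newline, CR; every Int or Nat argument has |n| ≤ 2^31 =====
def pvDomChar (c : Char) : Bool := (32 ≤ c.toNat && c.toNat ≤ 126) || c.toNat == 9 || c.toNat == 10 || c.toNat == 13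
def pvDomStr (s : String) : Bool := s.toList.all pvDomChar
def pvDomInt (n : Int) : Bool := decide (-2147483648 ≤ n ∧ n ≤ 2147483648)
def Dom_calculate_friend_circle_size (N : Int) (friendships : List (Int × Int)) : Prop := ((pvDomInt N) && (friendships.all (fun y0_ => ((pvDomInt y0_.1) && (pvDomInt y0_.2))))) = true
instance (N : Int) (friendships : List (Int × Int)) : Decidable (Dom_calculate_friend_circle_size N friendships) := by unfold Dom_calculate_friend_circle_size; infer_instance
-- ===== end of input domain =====

-- B replaces A's union-find (parent pointers, recursive find with path compression) by an
-- explicit component table with small-to-large member relocation; objective: alternative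
-- (structurally different, similar cost).

-- ===== PORT A =====
-- find_set(x): recursive find with path compression; fuel = len(parent) always suffices
-- on inputs satisfying Pre_ (a union-by-size forest has root-chains shorter than its size).
def pvFindSet (fuel : Nat) (parent : List Int) (x : Int) : Int × List Int :=
  match fuel with
  | 0 => (PySem.List.pyGetD parent x 0, parent)
  | fuel + 1 =>
    let px := PySem.List.pyGetD parent x 0
    if px ≠ x then
      let r := pvFindSet fuel parent px
      (r.1, PySem.List.pySetD r.2 x r.1)
    else (px, parent)

def pvUnionSets (parent size : List Int) (a b : Int) : (List Int × List Int) :=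
  let fa := pvFindSet parent.length parent a
  let fb := pvFindSet fa.2.length fa.2 b
  if fa.1 ≠ fb.1 then
    let sw := if PySem.List.pyGetD size fa.1 0 < PySem.List.pyGetD size fb.1 0
              then (fb.1, fa.1) else (fa.1, fb.1)
    (PySem.List.pySetD fb.2 sw.2 sw.1,
     PySem.List.pySetD size sw.1 (PySem.List.pyGetD size sw.1 0 + PySem.List.pyGetD size sw.2 0))
  else (fb.2, size)

def pvStepA (st : List Int × List Int × List Int) (ab : Int × Int) :
    List Int × List Int × List Int :=
  let u := pvUnionSets st.1 st.2.1 ab.1 ab.2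
  let f := pvFindSet u.1.length u.1 ab.1
  (f.2, u.2, st.2.2 ++ [PySem.List.pyGetD u.2 f.1 0])

def calculate_friend_circle_size (N : Int) (friendships : List (Int × Int)) : List Int :=
  let parent := PySem.List.pyRange 0 (N + 1) 1
  let size := PySem.List.pyRepeat [(1 : Int)] (N + 1)
  (friendships.foldl pvStepA (parent, size, [])).2.2

-- ===== PORT B =====
-- comp[x] = group id of x; members[g] = list of persons currently in group g.
def pvRelocate (ga : Int) (comp : List Int) (xs : List Int) : List Int :=
  xs.foldl (fun c x => PySem.List.pySetD c x ga) comp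

def pvStepB (st : List Int × List (List Int) × List Int) (ab : Int × Int) :
    List Int × List (List Int) × List Int :=
  let ga := PySem.List.pyGetD st.1 ab.1 0
  let gb := PySem.List.pyGetD st.1 ab.2 0
  let cm :=
    if ga ≠ gb then
      let sw := if (PySem.List.pyGetD st.2.1 ga []).length < (PySem.List.pyGetD st.2.1 gb []).length
                then (gb, ga) else (ga, gb)
      let comp' := pvRelocate sw.1 st.1 (PySem.List.pyGetD st.2.1 sw.2 [])
      let members' := PySem.List.pySetD st.2.1 sw.1
        (PySem.List.pyGetD st.2.1 sw.1 [] ++ PySem.List.pyGetD st.2.1 sw.2 [])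
      (comp', PySem.List.pySetD members' sw.2 [])
    else (st.1, st.2.1)
  (cm.1, cm.2, st.2.2 ++ [((PySem.List.pyGetD cm.2 (PySem.List.pyGetD cm.1 ab.1 0) []).length : Int)])

def calculate_friend_circle_size_alt (N : Int) (friendships : List (Int × Int)) : List Int :=
  let comp := PySem.List.pyRange 0 (N + 1) 1
  let members := (PySem.List.pyRange 0 (N + 1) 1).map (fun x => [x])
  (friendships.foldl pvStepB (comp, members, [])).2.2

-- ===== PRECONDITION & SPEC =====
-- Pre_ excludes exactly the inputs where Python A raises (IndexError / RecursionError):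
-- a friendship endpoint outside the valid index range of the length-(N+1) person list.
def Pre_calculate_friend_circle_size (N : Int) (friendships : List (Int × Int)) : Prop :=
  ∀ ab ∈ friendships, PySem.Raise.InRange (N + 1).toNat ab.1 ∧ PySem.Raise.InRange (N + 1).toNat ab.2
instance (N : Int) (friendships : List (Int × Int)) : Decidable (Pre_calculate_friend_circle_size N friendships) := by
  unfold Pre_calculate_friend_circle_size; infer_instance

def pvWitness_calculate_friend_circle_size : Int × (List (Int × Int)) := (3, [(0, 1), (2, 3), (1, 3)])

def Spec_calculate_friend_circle_size (N : Int) (friendships : List (Int × Int)) (out : List Int) : Prop := out = calculate_friend_circle_size_alt N friendships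
instance (N : Int) (friendships : List (Int × Int)) (out : List Int) : Decidable (Spec_calculate_friend_circle_size N friendships out) := by unfold Spec_calculate_friend_circle_size; infer_instance

-- ===== CLAIM (what is proved, stated in full; the proofs are below) =====
def Claim_equal_calculate_friend_circle_size : Prop := ∀ (N : Int) (friendships : List (Int × Int)), Dom_calculate_friend_circle_size N friendships → Pre_calculate_friend_circle_size N friendships → Spec_calculate_friend_circle_size N friendships (calculate_friend_circle_size N friendships)

-- ===== LEMMAS AND PROOFS =====

-- Normalised (Python-wrapped) index of i into a list of length L.
def pvNIdx (L : Nat) (i : Int) : Nat := if i < 0 then (i + L).toNat else i.toNat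

-- k-fold parent-pointer iteration.
def pvIter (p : List Int) : Nat → Nat → Nat
  | 0, j => j
  | k + 1, j => pvIter p k (p.getD j 0).toNat

-- number of persons in class g
def pvCnt (L : Nat) (c : List Int) (g : Int) : Nat :=
  (List.range L).countP (fun j => c.getD j 0 = g)

-- The coupling invariant between A's state (p, s) and B's state (c, m).
structure pvInv (L : Nat) (p s c : List Int) (m : List (List Int)) : Prop where
  hpl : p.length = L
  hsl : s.length = L
  hcl : c.length = L
  hml : m.length = L
  hcr : ∀ j < L, 0 ≤ c.getD j 0 ∧ (c.getD j 0).toNat < L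
  hci : ∀ j < L, c.getD (c.getD j 0).toNat 0 = c.getD j 0
  hpr : ∀ j < L, 0 ≤ p.getD j 0 ∧ (p.getD j 0).toNat < L
  hpc : ∀ j < L, c.getD (p.getD j 0).toNat 0 = c.getD j 0
  hrt : ∀ j < L, p.getD (c.getD j 0).toNat 0 = c.getD j 0
  hdep : ∀ j < L, ∃ k, k + 1 ≤ pvCnt L c (c.getD j 0) ∧ pvIter p k j = (c.getD j 0).toNat
  hsz : ∀ j < L, s.getD (c.getD j 0).toNat 0 = (pvCnt L c (c.getD j 0) : Int)
  hmm : ∀ g < L, ∀ x : Int, x ∈ m.getD g [] ↔ (0 ≤ x ∧ x.toNat < L ∧ c.getD x.toNat 0 = (g : Int))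
  hmn : ∀ g < L, (m.getD g []).Nodup

def pvCompat (L : Nat) (p p' c : List Int) : Prop :=
  p'.length = p.length ∧ ∀ j < L, p'.getD j 0 = p.getD j 0 ∨ p'.getD j 0 = c.getD j 0
theorem pv_getD_set {α : Type} (l : List α) (n j : Nat) (v d : α) :
    (l.set n v).getD j d = if j = n ∧ n < l.length then v else l.getD j d := by
  simp [List.getD, List.getElem?_set]
  by_cases hj : j = n
  · subst hj
    by_cases hn : j < l.length <;> simp [hn]
  · simp [hj, (Ne.symm hj : ¬ n = j)]

theorem pv_inRange_iff (L : Nat) (i : Int) : PySem.Raise.InRange L i ↔ (-(L : Int) ≤ i ∧ i < L) := by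
  simp [PySem.Raise.InRange]

theorem pv_pyGetD {α : Type} [Inhabited α] (l : List α) {L : Nat} (hl : l.length = L) {i : Int}
    (h : PySem.Raise.InRange L i) (d : α) :
    PySem.List.pyGetD l i d = l.getD (pvNIdx L i) d := by
  rw [pv_inRange_iff] at h
  subst hl
  by_cases h0 : i < 0
  · simp [PySem.List.pyGetD, PySem.List.pyGet?, PySem.List.pyIdx?, h0.not_ge, pvNIdx, h0, h.1, List.getD]
    have he : l.length - (-i).toNat = (i + l.length).toNat := by omega
    rw [he]
  · simp [PySem.List.pyGetD, PySem.List.pyGet?, PySem.List.pyIdx?, pvNIdx, h0, h.2, (by omega : (0:Int) ≤ i), List.getD]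

theorem pv_pySetD {α : Type} (l : List α) {L : Nat} (hl : l.length = L) {i : Int}
    (h : PySem.Raise.InRange L i) (v : α) :
    PySem.List.pySetD l i v = l.set (pvNIdx L i) v := by
  rw [pv_inRange_iff] at h
  subst hl
  by_cases h0 : i < 0
  · simp [PySem.List.pySetD, PySem.List.pySet?, PySem.List.pyIdx?, h0.not_ge, pvNIdx, h0, h.1]
    have he : l.length - (-i).toNat = (i + l.length).toNat := by omega
    rw [he]
  · simp [PySem.List.pySetD, PySem.List.pySet?, PySem.List.pyIdx?, pvNIdx, h0, h.2, (by omega : (0:Int) ≤ i)]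

theorem pvNIdx_lt {L : Nat} {i : Int} (h : PySem.Raise.InRange L i) : pvNIdx L i < L := by
  rw [pv_inRange_iff] at h; unfold pvNIdx; split <;> omega

theorem pvIter_fix (p : List Int) {j : Nat} (h : p.getD j 0 = (j : Int)) :
    ∀ k, pvIter p k j = j := by
  intro k; induction k with
  | zero => rfl
  | succ k ih => rw [pvIter, h]; simpa using ih

theorem pvCnt_le (L : Nat) (c : List Int) (g : Int) : pvCnt L c g ≤ L := by
  simpa [pvCnt] using List.countP_le_length (l := List.range L) (p := fun j => c.getD j 0 = g)

theorem pvCnt_pos {L : Nat} (c : List Int) {j : Nat} (hj : j < L) :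
    1 ≤ pvCnt L c (c.getD j 0) := by
  unfold pvCnt
  exact List.countP_pos_iff.mpr ⟨j, List.mem_range.mpr hj, by simp⟩

theorem pv_countP_disjoint (l : List Nat) (p q : Nat → Bool) (h : ∀ x ∈ l, ¬(p x ∧ q x)) :
    l.countP (fun x => p x || q x) = l.countP p + l.countP q := by
  induction l with
  | nil => rfl
  | cons a l ih =>
    have ha := h a (List.mem_cons_self)
    have ih' := ih (fun x hx => h x (List.mem_cons_of_mem a hx))
    rw [List.countP_cons, List.countP_cons, List.countP_cons, ih']
    by_cases hp : p a <;> by_cases hq : q a <;> simp [hp, hq] at ha ⊢ <;> omega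

theorem pv_mlen {L : Nat} {c : List Int} {m : List (List Int)}
    (hmm : ∀ g < L, ∀ x : Int, x ∈ m.getD g [] ↔ (0 ≤ x ∧ x.toNat < L ∧ c.getD x.toNat 0 = (g : Int)))
    (hmn : ∀ g < L, (m.getD g []).Nodup) {g : Nat} (hg : g < L) :
    (m.getD g []).length = pvCnt L c (g : Int) := by
  have hperm : (m.getD g []).Perm
      (((List.range L).filter (fun j => decide (c.getD j 0 = (g : Int)))).map (fun (j : Nat) => (j : Int))) := by
    rw [List.perm_ext_iff_of_nodup (hmn g hg)
      (((List.nodup_range).filter _).map (fun a b hab => by omega))]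
    intro x
    rw [hmm g hg x]
    constructor
    · rintro ⟨h0, h1, h2⟩
      exact List.mem_map.mpr ⟨x.toNat, List.mem_filter.mpr
        ⟨List.mem_range.mpr h1, by simpa [List.getD] using h2⟩, by omega⟩
    · intro hx
      obtain ⟨j, hj, rfl⟩ := List.mem_map.mp hx
      obtain ⟨hjr, hcj⟩ := List.mem_filter.mp hj
      exact ⟨by omega, by simpa using List.mem_range.mp hjr, by simpa [List.getD] using hcj⟩
  have := hperm.length_eq
  rw [this, List.length_map]
  simp [pvCnt, List.countP_eq_length_filter]

theorem pvCompat_refl (L : Nat) (p c : List Int) : pvCompat L p p c :=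
  ⟨rfl, fun _ _ => Or.inl rfl⟩

theorem pvIter_compat {L : Nat} {p s c : List Int} {p' : List Int} {mm : List (List Int)}
    (hinv : pvInv L p s c mm) (hco : pvCompat L p p' c) :
    ∀ (k j : Nat), j < L → pvIter p k j = (c.getD j 0).toNat →
      pvIter p' k j = (c.getD j 0).toNat := by
  intro k
  induction k with
  | zero => intro j _ h; exact h
  | succ k ih =>
    intro j hj h
    have hr : (c.getD j 0).toNat < L := (hinv.hcr j hj).2
    have hrfix : p'.getD (c.getD j 0).toNat 0 = ((c.getD j 0).toNat : Int) := by
      have h0 : 0 ≤ c.getD j 0 := (hinv.hcr j hj).1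
      rcases hco.2 _ hr with he | he
      · rw [he, hinv.hrt j hj]; omega
      · rw [he, hinv.hci j hj]; omega
    rcases hco.2 j hj with he | he
    · have h' : pvIter p k (p.getD j 0).toNat = (c.getD (p.getD j 0).toNat 0).toNat := by
        rw [hinv.hpc j hj]; exact h
      have := ih (p.getD j 0).toNat (hinv.hpr j hj).2 h'
      rw [hinv.hpc j hj] at this
      rw [pvIter, he]; exact this
    · rw [pvIter, he]
      exact pvIter_fix p' hrfix k

theorem pvInv_compat {L : Nat} {p s c : List Int} {m : List (List Int)} {p' : List Int}
    (hinv : pvInv L p s c m) (hco : pvCompat L p p' c) : pvInv L p' s c m := by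
  have hpr' : ∀ j < L, 0 ≤ p'.getD j 0 ∧ (p'.getD j 0).toNat < L := by
    intro j hj
    rcases hco.2 j hj with he | he
    · rw [he]; exact hinv.hpr j hj
    · rw [he]; exact hinv.hcr j hj
  refine ⟨hco.1.trans hinv.hpl, hinv.hsl, hinv.hcl, hinv.hml, hinv.hcr, hinv.hci, hpr', ?_, ?_, ?_, hinv.hsz, hinv.hmm, hinv.hmn⟩
  · intro j hj
    rcases hco.2 j hj with he | he
    · rw [he]; exact hinv.hpc j hj
    · rw [he]; exact hinv.hci j hj
  · intro j hj
    have hr : (c.getD j 0).toNat < L := (hinv.hcr j hj).2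
    rcases hco.2 _ hr with he | he
    · rw [he]; exact hinv.hrt j hj
    · rw [he]; exact hinv.hci j hj
  · intro j hj
    obtain ⟨k, hk1, hk2⟩ := hinv.hdep j hj
    exact ⟨k, hk1, pvIter_compat hinv hco k j hj hk2⟩

theorem pvFindSet_zero (p : List Int) (x : Int) :
    pvFindSet 0 p x = (PySem.List.pyGetD p x 0, p) := rfl

theorem pvFindSet_succ (fuel : Nat) (p : List Int) (x : Int) :
    pvFindSet (fuel + 1) p x =
      if PySem.List.pyGetD p x 0 ≠ x then
        ((pvFindSet fuel p (PySem.List.pyGetD p x 0)).1,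
         PySem.List.pySetD (pvFindSet fuel p (PySem.List.pyGetD p x 0)).2 x
           (pvFindSet fuel p (PySem.List.pyGetD p x 0)).1)
      else (PySem.List.pyGetD p x 0, p) := rfl

theorem pv_find_spec {L : Nat} {p s c : List Int} {m : List (List Int)} (hinv : pvInv L p s c m) :
    ∀ (fuel : Nat) (j k : Nat), j < L → k ≤ fuel → pvIter p k j = (c.getD j 0).toNat →
    (pvFindSet fuel p (j : Int)).1 = c.getD j 0 ∧ pvCompat L p (pvFindSet fuel p (j : Int)).2 c := by
  intro fuel
  induction fuel with
  | zero =>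
    intro j k hj hk hiter
    interval_cases k
    simp only [pvIter] at hiter
    refine ⟨?_, pvCompat_refl L p c⟩
    simp only [pvFindSet_zero, PySem.List.pyGetD_natCast]
    have h1 := hinv.hrt j hj
    rw [← hiter] at h1
    exact h1
  | succ fuel ih =>
    intro j k hj hk hiter
    by_cases hroot : p.getD j 0 = (j : Int)
    · have hj' : j = (c.getD j 0).toNat := by
        have := pvIter_fix p hroot k
        omega
      have h0 := (hinv.hcr j hj).1
      have hcond : ¬ (PySem.List.pyGetD p (j : Int) 0 ≠ (j : Int)) := by
        rw [PySem.List.pyGetD_natCast]; simpa using hroot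
      refine ⟨?_, ?_⟩
      · rw [pvFindSet_succ, if_neg hcond]
        show PySem.List.pyGetD p (j : Int) 0 = c.getD j 0
        rw [PySem.List.pyGetD_natCast, hroot]
        omega
      · rw [pvFindSet_succ, if_neg hcond]
        exact pvCompat_refl L p c
    · have hk0 : k ≠ 0 := by
        intro h; subst h
        simp only [pvIter] at hiter
        have h1 := hinv.hrt j hj
        rw [← hiter] at h1
        have h0 := (hinv.hcr j hj).1
        omega
      obtain ⟨k', rfl⟩ := Nat.exists_eq_succ_of_ne_zero hk0
      have hpx0 : 0 ≤ p.getD j 0 := (hinv.hpr j hj).1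
      have hpxl : (p.getD j 0).toNat < L := (hinv.hpr j hj).2
      have hitr' : pvIter p k' (p.getD j 0).toNat = (c.getD (p.getD j 0).toNat 0).toNat := by
        rw [hinv.hpc j hj]
        simpa [pvIter] using hiter
      have hrec := ih (p.getD j 0).toNat k' hpxl (by omega) hitr'
      have hcast : (((p.getD j 0).toNat : Nat) : Int) = p.getD j 0 := by omega
      rw [hcast] at hrec
      have hr1 : (pvFindSet fuel p (p.getD j 0)).1 = c.getD j 0 := by
        rw [hrec.1, hinv.hpc j hj]
      have hco := hrec.2
      have hlen : (pvFindSet fuel p (p.getD j 0)).2.length = p.length := hco.1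
      have hcond : (PySem.List.pyGetD p (j : Int) 0 ≠ (j : Int)) := by
        rw [PySem.List.pyGetD_natCast]; exact hroot
      refine ⟨?_, ?_⟩
      · rw [pvFindSet_succ, if_pos hcond]
        show (pvFindSet fuel p (PySem.List.pyGetD p (j : Int) 0)).1 = c.getD j 0
        rw [PySem.List.pyGetD_natCast]
        exact hr1
      · rw [pvFindSet_succ, if_pos hcond]
        show pvCompat L p (PySem.List.pySetD (pvFindSet fuel p (PySem.List.pyGetD p (j : Int) 0)).2 (j : Int)
          (pvFindSet fuel p (PySem.List.pyGetD p (j : Int) 0)).1) c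
        rw [PySem.List.pyGetD_natCast, PySem.List.pySetD_natCast]
        refine ⟨by rw [List.length_set]; exact hlen, ?_⟩
        intro j' hj'
        by_cases he : j' = j
        · subst he
          right
          rw [pv_getD_set, if_pos ⟨rfl, by rw [hlen, hinv.hpl]; exact hj⟩, hr1]
        · rw [pv_getD_set, if_neg (by tauto)]
          exact hco.2 j' hj'

theorem pv_inRange_root {L : Nat} {c : List Int} (h0 : 0 ≤ c.getD j 0) (h1 : (c.getD j 0).toNat < L) :
    PySem.Raise.InRange L (c.getD j 0) := by
  rw [pv_inRange_iff]; omega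

theorem pv_find_entry {L : Nat} {p s c : List Int} {m : List (List Int)} (hinv : pvInv L p s c m)
    {a : Int} (ha : PySem.Raise.InRange L a) :
    (pvFindSet p.length p a).1 = c.getD (pvNIdx L a) 0 ∧
      pvCompat L p (pvFindSet p.length p a).2 c := by
  have hna : pvNIdx L a < L := pvNIdx_lt ha
  obtain ⟨k, hk1, hk2⟩ := hinv.hdep (pvNIdx L a) hna
  have hkL : k + 1 ≤ L := le_trans hk1 (pvCnt_le L c _)
  by_cases h0 : 0 ≤ a
  · have hae : a = ((pvNIdx L a : Nat) : Int) := by unfold pvNIdx; split <;> omega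
    rw [hae]
    exact pv_find_spec hinv p.length (pvNIdx L a) k hna (by rw [hinv.hpl]; omega) hk2
  · -- a < 0 : parent[a] is nonnegative hence ≠ a; one unfolding, then the spec on parent[a]
    have hL0 : 0 < L := by rw [pv_inRange_iff] at ha; omega
    obtain ⟨fuel', hfuel⟩ : ∃ f, p.length = f + 1 := ⟨L - 1, by rw [hinv.hpl]; omega⟩
    have hget : PySem.List.pyGetD p a 0 = p.getD (pvNIdx L a) 0 := pv_pyGetD p hinv.hpl ha 0
    have hpx0 : 0 ≤ p.getD (pvNIdx L a) 0 := (hinv.hpr _ hna).1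
    have hpxl : (p.getD (pvNIdx L a) 0).toNat < L := (hinv.hpr _ hna).2
    have hcond : PySem.List.pyGetD p a 0 ≠ a := by rw [hget]; omega
    have hitr' : ∃ k', k' ≤ fuel' ∧
        pvIter p k' (p.getD (pvNIdx L a) 0).toNat = (c.getD (p.getD (pvNIdx L a) 0).toNat 0).toNat := by
      cases k with
      | zero =>
        simp only [pvIter] at hk2
        have hroot : p.getD (pvNIdx L a) 0 = c.getD (pvNIdx L a) 0 := by
          have h1 := hinv.hrt (pvNIdx L a) hna
          rw [← hk2] at h1; exact h1
        refine ⟨0, by omega, ?_⟩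
        simp only [pvIter]
        have hX : (p.getD (pvNIdx L a) 0).toNat = pvNIdx L a := by rw [hroot]; exact hk2.symm
        rw [hX]; exact hk2
      | succ k'' =>
        refine ⟨k'', by rw [hinv.hpl] at hfuel; omega, ?_⟩
        rw [hinv.hpc _ hna]
        simpa [pvIter] using hk2
    obtain ⟨k', hk'f, hk'2⟩ := hitr'
    have hcast : (((p.getD (pvNIdx L a) 0).toNat : Nat) : Int) = p.getD (pvNIdx L a) 0 := by omega
    have hrec := pv_find_spec hinv fuel' (p.getD (pvNIdx L a) 0).toNat k' hpxl hk'f hk'2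
    rw [hcast] at hrec
    have hr1 : (pvFindSet fuel' p (p.getD (pvNIdx L a) 0)).1 = c.getD (pvNIdx L a) 0 := by
      rw [hrec.1, hinv.hpc _ hna]
    have hco := hrec.2
    have hlen : (pvFindSet fuel' p (p.getD (pvNIdx L a) 0)).2.length = p.length := hco.1
    rw [hfuel, pvFindSet_succ, if_pos hcond, hget]
    refine ⟨hr1, ?_⟩
    show pvCompat L p (PySem.List.pySetD (pvFindSet fuel' p (p.getD (pvNIdx L a) 0)).2 a
      (pvFindSet fuel' p (p.getD (pvNIdx L a) 0)).1) c
    rw [pv_pySetD _ (hlen.trans hinv.hpl) ha, hr1]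
    refine ⟨by rw [List.length_set]; exact hlen, ?_⟩
    intro j' hj'
    by_cases he : j' = pvNIdx L a
    · subst he; right
      rw [pv_getD_set, if_pos ⟨rfl, by rw [hlen, hinv.hpl]; exact hna⟩]
    · rw [pv_getD_set, if_neg (fun hx => he hx.1)]
      exact hco.2 j' hj'

theorem pv_append_val {L : Nat} {p s c : List Int} {m : List (List Int)} (hinv : pvInv L p s c m)
    {a : Int} (ha : PySem.Raise.InRange L a) :
    PySem.List.pyGetD s (pvFindSet p.length p a).1 0
      = ((m.getD (c.getD (pvNIdx L a) 0).toNat []).length : Int)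
    ∧ pvInv L (pvFindSet p.length p a).2 s c m := by
  obtain ⟨h1, h2⟩ := pv_find_entry hinv ha
  have hna : pvNIdx L a < L := pvNIdx_lt ha
  have h0 := (hinv.hcr _ hna).1
  have hub := (hinv.hcr _ hna).2
  refine ⟨?_, pvInv_compat hinv h2⟩
  have hnn : ∀ v : Int, 0 ≤ v → pvNIdx L v = v.toNat := by
    intro v hv; unfold pvNIdx; split <;> omega
  have harg : (((c.getD (pvNIdx L a) 0).toNat : Nat) : Int) = c.getD (pvNIdx L a) 0 := by omega
  rw [h1, pv_pyGetD s hinv.hsl (pv_inRange_root h0 hub) 0, hnn _ h0, hinv.hsz _ hna,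
    pv_mlen hinv.hmm hinv.hmn hub, harg]

theorem pv_relocate_len (g : Int) (c xs : List Int) : (pvRelocate g c xs).length = c.length := by
  induction xs generalizing c with
  | nil => rfl
  | cons x xs ih =>
    show (pvRelocate g (PySem.List.pySetD c x g) xs).length = c.length
    rw [ih, PySem.List.length_pySetD]

theorem pv_relocate_getD (g : Int) (c xs : List Int)
    (hxs : ∀ x ∈ xs, 0 ≤ x ∧ x.toNat < c.length) (j : Nat) :
    (pvRelocate g c xs).getD j 0 = if (j : Int) ∈ xs then g else c.getD j 0 := by
  induction xs generalizing c with
  | nil => simp [pvRelocate]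
  | cons x xs ih =>
    obtain ⟨hx0, hxl⟩ := hxs x List.mem_cons_self
    have hstep : pvRelocate g c (x :: xs) = pvRelocate g (c.set x.toNat g) xs := by
      show pvRelocate g (PySem.List.pySetD c x g) xs = _
      rw [PySem.List.pySetD_of_nonneg c g hx0]
    rw [hstep, ih (c.set x.toNat g) (by
      intro y hy
      have := hxs y (List.mem_cons_of_mem x hy)
      simpa using this)]
    rw [pv_getD_set]
    by_cases hmem : (j : Int) ∈ xs
    · simp [hmem, List.mem_cons]
    · by_cases hje : (j : Int) = x
      · have : j = x.toNat := by omega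
        subst this
        simp [hje, hxl]
      · have : ¬ (j = x.toNat ∧ x.toNat < c.length) := by
          intro hh; exact hje (by omega)
        simp [hmem, hje, this, List.mem_cons]

theorem pv_iterA {L : Nat} {p c : List Int} {gb : Int}
    (hpr : ∀ j < L, 0 ≤ p.getD j 0 ∧ (p.getD j 0).toNat < L)
    (hpc : ∀ j < L, c.getD (p.getD j 0).toNat 0 = c.getD j 0)
    (hgbr : c.getD gb.toNat 0 = gb) (hpl : p.length = L) (hgbl : gb.toNat < L) :
    ∀ (k j : Nat), j < L → c.getD j 0 ≠ gb → pvIter p k j = (c.getD j 0).toNat →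
      pvIter (p.set gb.toNat ga) k j = (c.getD j 0).toNat := by
  intro k
  induction k with
  | zero => intro j _ _ h; exact h
  | succ k ih =>
    intro j hj hne h
    have hjne : j ≠ gb.toNat := fun he => hne (he ▸ hgbr)
    have hset : (p.set gb.toNat ga).getD j 0 = p.getD j 0 := by
      rw [pv_getD_set, if_neg (fun hh => hjne hh.1)]
    rw [pvIter, hset]
    have h' := ih (p.getD j 0).toNat (hpr j hj).2
      (by rw [hpc j hj]; exact hne) (by rw [hpc j hj]; simpa [pvIter] using h)
    rw [hpc j hj] at h'
    exact h'

theorem pv_iterB {L : Nat} {p c : List Int} {ga gb : Int}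
    (hpr : ∀ j < L, 0 ≤ p.getD j 0 ∧ (p.getD j 0).toNat < L)
    (hga0 : 0 ≤ ga) (hgal : ga.toNat < L) (hgar : c.getD ga.toNat 0 = ga)
    (hrt : ∀ j < L, p.getD (c.getD j 0).toNat 0 = c.getD j 0)
    (hne : ga ≠ gb) (hgb0 : 0 ≤ gb)
    (hpl : p.length = L) (hgbl : gb.toNat < L) :
    ∀ (k j : Nat), j < L → pvIter p k j = gb.toNat →
      pvIter (p.set gb.toNat ga) (k + 1) j = ga.toNat := by
  have hpga : (p.set gb.toNat ga).getD ga.toNat 0 = ((ga.toNat : Nat) : Int) := by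
    rw [pv_getD_set, if_neg (fun hh => (by omega : ga.toNat ≠ gb.toNat) hh.1)]
    have := hrt ga.toNat hgal
    rw [hgar] at this
    rw [this]; omega
  have hstepb : (p.set gb.toNat ga).getD gb.toNat 0 = ga := by
    rw [pv_getD_set, if_pos ⟨rfl, by rw [hpl]; exact hgbl⟩]
  intro k
  induction k with
  | zero =>
    intro j hj h
    simp only [pvIter] at h ⊢
    subst h
    rw [hstepb]
  | succ k ih =>
    intro j hj h
    by_cases hje : j = gb.toNat
    · subst hje
      show pvIter (p.set gb.toNat ga) (k + 1) ((p.set gb.toNat ga).getD gb.toNat 0).toNat = ga.toNat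
      rw [hstepb]
      exact pvIter_fix _ hpga (k + 1)
    · have hset : (p.set gb.toNat ga).getD j 0 = p.getD j 0 := by
        rw [pv_getD_set, if_neg (fun hh => hje hh.1)]
      show pvIter (p.set gb.toNat ga) (k + 1) ((p.set gb.toNat ga).getD j 0).toNat = ga.toNat
      rw [hset]
      exact ih (p.getD j 0).toNat (hpr j hj).2 (by simpa [pvIter] using h)

theorem pv_inv_union {L : Nat} {p s c : List Int} {m : List (List Int)}
    (hinv : pvInv L p s c m) {ga gb : Int}
    (hga0 : 0 ≤ ga) (hgal : ga.toNat < L) (hgb0 : 0 ≤ gb) (hgbl : gb.toNat < L)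
    (hgar : c.getD ga.toNat 0 = ga) (hgbr : c.getD gb.toNat 0 = gb)
    (hne : ga ≠ gb)
    {c' : List Int} (hc'l : c'.length = L)
    (hc' : ∀ j < L, c'.getD j 0 = if c.getD j 0 = gb then ga else c.getD j 0)
    {m' : List (List Int)} (hm'l : m'.length = L)
    (hm'a : m'.getD ga.toNat [] = m.getD ga.toNat [] ++ m.getD gb.toNat [])
    (hm'b : m'.getD gb.toNat [] = [])
    (hm'o : ∀ g, g ≠ ga.toNat → g ≠ gb.toNat → m'.getD g [] = m.getD g []) :
    pvInv L (p.set gb.toNat ga) (s.set ga.toNat ((pvCnt L c ga + pvCnt L c gb : Nat) : Int)) c' m' := by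
  have hnt : ga.toNat ≠ gb.toNat := by omega
  have hA : pvCnt L c' ga = pvCnt L c ga + pvCnt L c gb := by
    unfold pvCnt
    have h1 : (List.range L).countP (fun j => c'.getD j 0 = ga) =
        (List.range L).countP (fun j => decide (c.getD j 0 = ga) || decide (c.getD j 0 = gb)) := by
      apply List.countP_congr
      intro j hj
      rw [hc' j (List.mem_range.mp hj)]
      by_cases h : c.getD j 0 = gb <;> simp [h, or_comm]
    rw [h1, pv_countP_disjoint]
    intro x _ hx
    have h1 := of_decide_eq_true hx.1
    have h2 := of_decide_eq_true hx.2
    exact hne (h1 ▸ h2 ▸ rfl)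
  have hB : ∀ g : Int, g ≠ ga → g ≠ gb → pvCnt L c' g = pvCnt L c g := by
    intro g hg1 hg2
    apply List.countP_congr
    intro j hj
    rw [hc' j (List.mem_range.mp hj)]
    by_cases h : c.getD j 0 = gb
    · rw [if_pos h]
      simp only [decide_eq_true_eq]
      constructor
      · intro hh; exact absurd hh.symm hg1
      · intro hh; rw [h] at hh; exact absurd hh.symm hg2
    · rw [if_neg h]
  have hnogb : ∀ j < L, c'.getD j 0 ≠ gb := by
    intro j hj
    rw [hc' j hj]
    by_cases h : c.getD j 0 = gb
    · rw [if_pos h]; exact hne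
    · rw [if_neg h]; exact h
  have hnt2 : (ga.toNat : Int) = ga := by omega
  have hnt3 : (gb.toNat : Int) = gb := by omega
  have hga1 : 1 ≤ pvCnt L c ga := by
    have := pvCnt_pos c hgal
    rw [hgar] at this; exact this
  have hgblp : gb.toNat < p.length := by rw [hinv.hpl]; exact hgbl
  have hpset : ∀ j : Nat, (p.set gb.toNat ga).getD j 0 = if j = gb.toNat then ga else p.getD j 0 := by
    intro j; rw [pv_getD_set]
    by_cases h : j = gb.toNat
    · rw [if_pos ⟨h, hgblp⟩, if_pos h]
    · rw [if_neg (fun hh => h hh.1), if_neg h]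
  have hsset : ∀ j : Nat, (s.set ga.toNat ((pvCnt L c ga + pvCnt L c gb : Nat) : Int)).getD j 0 =
      if j = ga.toNat then ((pvCnt L c ga + pvCnt L c gb : Nat) : Int) else s.getD j 0 := by
    intro j; rw [pv_getD_set]
    by_cases h : j = ga.toNat
    · rw [if_pos ⟨h, by rw [hinv.hsl]; exact hgal⟩, if_pos h]
    · rw [if_neg (fun hh => h hh.1), if_neg h]
  refine ⟨by rw [List.length_set]; exact hinv.hpl, by rw [List.length_set]; exact hinv.hsl,
    hc'l, hm'l, ?_, ?_, ?_, ?_, ?_, ?_, ?_, ?_, ?_⟩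
  · -- hcr
    intro j hj; rw [hc' j hj]
    by_cases h : c.getD j 0 = gb
    · rw [if_pos h]; exact ⟨hga0, hgal⟩
    · rw [if_neg h]; exact hinv.hcr j hj
  · -- hci
    intro j hj; rw [hc' j hj]
    by_cases h : c.getD j 0 = gb
    · rw [if_pos h, hc' ga.toNat hgal, hgar, if_neg hne]
    · rw [if_neg h, hc' _ (hinv.hcr j hj).2, hinv.hci j hj, if_neg h]
  · -- hpr
    intro j hj; rw [hpset j]
    by_cases h : j = gb.toNat
    · rw [if_pos h]; exact ⟨hga0, hgal⟩
    · rw [if_neg h]; exact hinv.hpr j hj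
  · -- hpc
    intro j hj; rw [hpset j]
    by_cases h : j = gb.toNat
    · rw [if_pos h]; subst h
      rw [hc' _ hgal, hgar, if_neg hne, hc' _ hj, hgbr, if_pos rfl]
    · rw [if_neg h, hc' _ (hinv.hpr j hj).2, hinv.hpc j hj, hc' j hj]
  · -- hrt
    intro j hj; rw [hc' j hj]
    by_cases h : c.getD j 0 = gb
    · rw [if_pos h, hpset, if_neg hnt]
      have h2 := hinv.hrt ga.toNat hgal
      rw [hgar] at h2; exact h2
    · rw [if_neg h]
      have h0 := (hinv.hcr j hj).1
      rw [hpset, if_neg (by omega : (c.getD j 0).toNat ≠ gb.toNat)]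
      exact hinv.hrt j hj
  · -- hdep
    intro j hj
    obtain ⟨k, hk1, hk2⟩ := hinv.hdep j hj
    by_cases h : c.getD j 0 = gb
    · rw [h] at hk1 hk2
      refine ⟨k + 1, ?_, ?_⟩
      · rw [hc' j hj, if_pos h, hA]; omega
      · rw [hc' j hj, if_pos h]
        exact pv_iterB hinv.hpr hga0 hgal hgar hinv.hrt hne hgb0 hinv.hpl hgbl k j hj hk2
    · refine ⟨k, ?_, ?_⟩
      · rw [hc' j hj, if_neg h]
        by_cases hia : c.getD j 0 = ga
        · rw [hia, hA]; rw [hia] at hk1; omega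
        · rw [hB _ hia h]; exact hk1
      · rw [hc' j hj, if_neg h]
        exact pv_iterA hinv.hpr hinv.hpc hgbr hinv.hpl hgbl k j hj h hk2
  · -- hsz
    intro j hj; rw [hc' j hj]
    by_cases h : c.getD j 0 = gb
    · rw [if_pos h, hsset, if_pos rfl, hA]
    · rw [if_neg h]
      by_cases hia : c.getD j 0 = ga
      · rw [hia, hsset, if_pos rfl, hA]
      · have h0 := (hinv.hcr j hj).1
        rw [hsset, if_neg (by omega : (c.getD j 0).toNat ≠ ga.toNat), hinv.hsz j hj, hB _ hia h]
  · -- hmm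
    intro g hg x
    by_cases h1 : g = ga.toNat
    · subst h1
      rw [hm'a, List.mem_append, hinv.hmm ga.toNat hgal x, hinv.hmm gb.toNat hgbl x]
      constructor
      · rintro (⟨hx0, hxl, hcx⟩ | ⟨hx0, hxl, hcx⟩) <;> refine ⟨hx0, hxl, ?_⟩ <;> rw [hc' _ hxl]
        · rw [hnt2] at hcx
          rw [if_neg (by rw [hcx]; exact hne), hcx, hnt2]
        · rw [hnt3] at hcx
          rw [if_pos hcx, hnt2]
      · rintro ⟨hx0, hxl, hcx⟩
        rw [hc' _ hxl] at hcx
        by_cases hb : c.getD x.toNat 0 = gb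
        · right; exact ⟨hx0, hxl, by rw [hb, hnt3]⟩
        · left
          rw [if_neg hb] at hcx
          exact ⟨hx0, hxl, hcx⟩
    · by_cases h2 : g = gb.toNat
      · subst h2
        rw [hm'b]
        simp only [List.not_mem_nil, false_iff]
        rintro ⟨hx0, hxl, hcx⟩
        rw [hnt3] at hcx
        exact hnogb x.toNat hxl hcx
      · rw [hm'o g h1 h2, hinv.hmm g hg x]
        have hgne1 : (g : Int) ≠ ga := by omega
        have hgne2 : (g : Int) ≠ gb := by omega
        constructor
        · rintro ⟨hx0, hxl, hcx⟩
          refine ⟨hx0, hxl, ?_⟩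
          rw [hc' _ hxl, if_neg (by rw [hcx]; exact hgne2), hcx]
        · rintro ⟨hx0, hxl, hcx⟩
          rw [hc' _ hxl] at hcx
          refine ⟨hx0, hxl, ?_⟩
          by_cases hb : c.getD x.toNat 0 = gb
          · rw [if_pos hb] at hcx
            exact absurd hcx.symm hgne1
          · rw [if_neg hb] at hcx
            exact hcx
  · -- hmn
    intro g hg
    by_cases h1 : g = ga.toNat
    · subst h1
      rw [hm'a]
      refine (hinv.hmn _ hgal).append (hinv.hmn _ hgbl) ?_
      intro x hxa hxb
      have ha2 := ((hinv.hmm ga.toNat hgal x).mp hxa).2.2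
      have hb2 := ((hinv.hmm gb.toNat hgbl x).mp hxb).2.2
      rw [hnt2] at ha2
      rw [hnt3] at hb2
      exact hne (ha2 ▸ hb2 ▸ rfl)
    · by_cases h2 : g = gb.toNat
      · subst h2; rw [hm'b]; exact List.nodup_nil
      · rw [hm'o g h1 h2]; exact hinv.hmn g hg

theorem pv_getD_bridge {α : Type} [Inhabited α] {L : Nat} (xs : List α) (hl : xs.length = L)
    {v : Int} (hv0 : 0 ≤ v) (hvl : v.toNat < L) (d : α) :
    PySem.List.pyGetD xs v d = xs.getD v.toNat d := by
  rw [pv_pyGetD xs hl (by rw [pv_inRange_iff]; omega) d]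
  congr 1
  unfold pvNIdx; split <;> omega

theorem pv_union_all {L : Nat} {p s c : List Int} {m : List (List Int)} (hinv : pvInv L p s c m)
    {w l : Int} (hw0 : 0 ≤ w) (hwl : w.toNat < L) (hl0 : 0 ≤ l) (hll : l.toNat < L)
    (hwr : c.getD w.toNat 0 = w) (hlr : c.getD l.toNat 0 = l) (hne : w ≠ l) :
    pvInv L (PySem.List.pySetD p l w)
      (PySem.List.pySetD s w (PySem.List.pyGetD s w 0 + PySem.List.pyGetD s l 0))
      (pvRelocate w c (PySem.List.pyGetD m l []))
      (PySem.List.pySetD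
        (PySem.List.pySetD m w (PySem.List.pyGetD m w [] ++ PySem.List.pyGetD m l [])) l []) := by
  have hmw : PySem.List.pyGetD m w [] = m.getD w.toNat [] := pv_getD_bridge m hinv.hml hw0 hwl []
  have hml' : PySem.List.pyGetD m l [] = m.getD l.toNat [] := pv_getD_bridge m hinv.hml hl0 hll []
  have hsw : PySem.List.pyGetD s w 0 = (pvCnt L c w : Int) := by
    rw [pv_getD_bridge s hinv.hsl hw0 hwl 0]
    have := hinv.hsz w.toNat hwl
    rw [hwr] at this; exact this
  have hsl' : PySem.List.pyGetD s l 0 = (pvCnt L c l : Int) := by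
    rw [pv_getD_bridge s hinv.hsl hl0 hll 0]
    have := hinv.hsz l.toNat hll
    rw [hlr] at this; exact this
  have hmemb : ∀ x ∈ m.getD l.toNat [], 0 ≤ x ∧ x.toNat < c.length := by
    intro x hx
    have h := (hinv.hmm l.toNat hll x).mp hx
    exact ⟨h.1, by rw [hinv.hcl]; exact h.2.1⟩
  rw [PySem.List.pySetD_of_nonneg p w hl0, PySem.List.pySetD_of_nonneg s _ hw0, hsw, hsl',
    hmw, hml', PySem.List.pySetD_of_nonneg m _ hw0, PySem.List.pySetD_of_nonneg _ _ hl0,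
    show ((pvCnt L c w : Int) + (pvCnt L c l : Int)) = ((pvCnt L c w + pvCnt L c l : Nat) : Int) by push_cast; ring]
  have hwnl : w.toNat ≠ l.toNat := by omega
  refine pv_inv_union hinv hw0 hwl hl0 hll hwr hlr hne ?_ ?_ ?_ ?_ ?_ ?_
  · rw [pv_relocate_len]; exact hinv.hcl
  · intro j hj
    rw [pv_relocate_getD w c _ hmemb j]
    by_cases hmem : (j : Int) ∈ m.getD l.toNat []
    · obtain ⟨_, _, hcj⟩ := (hinv.hmm l.toNat hll _).mp hmem
      rw [Int.toNat_natCast, Int.toNat_of_nonneg hl0] at hcj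
      rw [if_pos hmem, if_pos hcj]
    · have hnc : ¬ c.getD j 0 = l := by
        intro hcl
        exact hmem ((hinv.hmm l.toNat hll _).mpr
          ⟨by omega, by rwa [Int.toNat_natCast], by rw [Int.toNat_natCast, hcl, Int.toNat_of_nonneg hl0]⟩)
      rw [if_neg hmem, if_neg hnc]
  · rw [List.length_set, List.length_set]; exact hinv.hml
  · rw [pv_getD_set, if_neg (fun hh => hwnl hh.1), pv_getD_set,
      if_pos ⟨rfl, by rw [hinv.hml]; exact hwl⟩]
  · rw [pv_getD_set, if_pos ⟨rfl, by rw [List.length_set, hinv.hml]; exact hll⟩]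
  · intro g hg1 hg2
    rw [pv_getD_set, if_neg (fun hh => hg2 hh.1), pv_getD_set, if_neg (fun hh => hg1 hh.1)]

theorem pv_step {L : Nat} {p s c : List Int} {m : List (List Int)} {res : List Int}
    (hinv : pvInv L p s c m) {a b : Int}
    (ha : PySem.Raise.InRange L a) (hb : PySem.Raise.InRange L b) :
    ∃ p' s' c' m' v,
      pvStepA (p, s, res) (a, b) = (p', s', res ++ [v]) ∧
      pvStepB (c, m, res) (a, b) = (c', m', res ++ [v]) ∧
      pvInv L p' s' c' m' := by
  have hna : pvNIdx L a < L := pvNIdx_lt ha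
  have hnb : pvNIdx L b < L := pvNIdx_lt hb
  obtain ⟨hra, hcoa⟩ := pv_find_entry hinv ha
  have hinv1 : pvInv L (pvFindSet p.length p a).2 s c m := pvInv_compat hinv hcoa
  obtain ⟨hrb, hcob⟩ := pv_find_entry hinv1 hb
  have hinv2 : pvInv L (pvFindSet (pvFindSet p.length p a).2.length (pvFindSet p.length p a).2 b).2
      s c m := pvInv_compat hinv1 hcob
  have hga : PySem.List.pyGetD c a 0 = c.getD (pvNIdx L a) 0 := pv_pyGetD c hinv.hcl ha 0
  have hgb : PySem.List.pyGetD c b 0 = c.getD (pvNIdx L b) 0 := pv_pyGetD c hinv.hcl hb 0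
  have hcra := hinv.hcr _ hna
  have hcrb := hinv.hcr _ hnb
  by_cases heq : c.getD (pvNIdx L a) 0 = c.getD (pvNIdx L b) 0
  · -- roots equal: no union on either side
    have huA : pvUnionSets p s a b =
        ((pvFindSet (pvFindSet p.length p a).2.length (pvFindSet p.length p a).2 b).2, s) := by
      simp only [pvUnionSets]
      rw [hra, hrb, if_neg (not_ne_iff.mpr heq)]
    obtain ⟨hval, hinv3⟩ := pv_append_val (a := a) hinv2 ha
    refine ⟨_, _, c, m, _, rfl, ?_, ?_⟩
    · simp only [pvStepB]
      rw [hga, hgb, if_neg (not_ne_iff.mpr heq), huA, hval]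
      show (c, m, res ++ [((PySem.List.pyGetD m (PySem.List.pyGetD c a 0) []).length : Int)]) = _
      rw [hga, pv_getD_bridge m hinv.hml hcra.1 hcra.2 []]
    · rw [huA]
      exact hinv3
  · -- distinct roots: union on both sides
    have hroa : c.getD (c.getD (pvNIdx L a) 0).toNat 0 = c.getD (pvNIdx L a) 0 := hinv.hci _ hna
    have hrob : c.getD (c.getD (pvNIdx L b) 0).toNat 0 = c.getD (pvNIdx L b) 0 := hinv.hci _ hnb
    have hsa : PySem.List.pyGetD s (c.getD (pvNIdx L a) 0) 0
        = (pvCnt L c (c.getD (pvNIdx L a) 0) : Int) := by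
      rw [pv_getD_bridge s hinv.hsl hcra.1 hcra.2 0]; exact hinv.hsz _ hna
    have hsb : PySem.List.pyGetD s (c.getD (pvNIdx L b) 0) 0
        = (pvCnt L c (c.getD (pvNIdx L b) 0) : Int) := by
      rw [pv_getD_bridge s hinv.hsl hcrb.1 hcrb.2 0]; exact hinv.hsz _ hnb
    have hmaL : (PySem.List.pyGetD m (c.getD (pvNIdx L a) 0) []).length
        = pvCnt L c (c.getD (pvNIdx L a) 0) := by
      rw [pv_getD_bridge m hinv.hml hcra.1 hcra.2 [], pv_mlen hinv.hmm hinv.hmn hcra.2]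
      congr 1
      have := hcra.1; omega
    have hmbL : (PySem.List.pyGetD m (c.getD (pvNIdx L b) 0) []).length
        = pvCnt L c (c.getD (pvNIdx L b) 0) := by
      rw [pv_getD_bridge m hinv.hml hcrb.1 hcrb.2 [], pv_mlen hinv.hmm hinv.hmn hcrb.2]
      congr 1
      have := hcrb.1; omega
    by_cases hlt : pvCnt L c (c.getD (pvNIdx L a) 0) < pvCnt L c (c.getD (pvNIdx L b) 0)
    · -- b's root wins
      have hcondI : PySem.List.pyGetD s (c.getD (pvNIdx L a) 0) 0
          < PySem.List.pyGetD s (c.getD (pvNIdx L b) 0) 0 := by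
        rw [hsa, hsb]; exact_mod_cast hlt
      have hcondN : (PySem.List.pyGetD m (c.getD (pvNIdx L a) 0) []).length
          < (PySem.List.pyGetD m (c.getD (pvNIdx L b) 0) []).length := by
        rw [hmaL, hmbL]; exact hlt
      have huA : pvUnionSets p s a b =
          (PySem.List.pySetD (pvFindSet (pvFindSet p.length p a).2.length (pvFindSet p.length p a).2 b).2
            (c.getD (pvNIdx L a) 0) (c.getD (pvNIdx L b) 0),
           PySem.List.pySetD s (c.getD (pvNIdx L b) 0)
            (PySem.List.pyGetD s (c.getD (pvNIdx L b) 0) 0 + PySem.List.pyGetD s (c.getD (pvNIdx L a) 0) 0)) := by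
        simp only [pvUnionSets]
        rw [hra, hrb, if_pos heq, if_pos hcondI]
      have hinvU := pv_union_all hinv2 hcrb.1 hcrb.2 hcra.1 hcra.2 hrob hroa (fun hh => heq hh.symm)
      obtain ⟨hval, hinv3⟩ := pv_append_val (a := a) hinvU ha
      refine ⟨_, _,
        pvRelocate (c.getD (pvNIdx L b) 0) c (PySem.List.pyGetD m (c.getD (pvNIdx L a) 0) []),
        PySem.List.pySetD (PySem.List.pySetD m (c.getD (pvNIdx L b) 0)
          (PySem.List.pyGetD m (c.getD (pvNIdx L b) 0) [] ++ PySem.List.pyGetD m (c.getD (pvNIdx L a) 0) []))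
          (c.getD (pvNIdx L a) 0) [],
        _, by simp only [pvStepA]; rw [huA], ?_, ?_⟩
      · simp only [pvStepB]
        rw [hga, hgb, if_pos heq, if_pos hcondN]
        show (pvRelocate (c.getD (pvNIdx L b) 0) c (PySem.List.pyGetD m (c.getD (pvNIdx L a) 0) []),
          PySem.List.pySetD (PySem.List.pySetD m (c.getD (pvNIdx L b) 0)
            (PySem.List.pyGetD m (c.getD (pvNIdx L b) 0) [] ++ PySem.List.pyGetD m (c.getD (pvNIdx L a) 0) []))
            (c.getD (pvNIdx L a) 0) [],
          res ++ [((PySem.List.pyGetD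
            (PySem.List.pySetD (PySem.List.pySetD m (c.getD (pvNIdx L b) 0)
              (PySem.List.pyGetD m (c.getD (pvNIdx L b) 0) [] ++ PySem.List.pyGetD m (c.getD (pvNIdx L a) 0) []))
              (c.getD (pvNIdx L a) 0) [])
            (PySem.List.pyGetD (pvRelocate (c.getD (pvNIdx L b) 0) c (PySem.List.pyGetD m (c.getD (pvNIdx L a) 0) [])) a 0)
            []).length : Int)]) = _
        rw [hval, pv_pyGetD _ hinvU.hcl ha 0,
          pv_getD_bridge _ hinvU.hml (hinvU.hcr _ hna).1 (hinvU.hcr _ hna).2 []]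
      · exact hinv3
    · -- a's root wins
      have hcondI : ¬ (PySem.List.pyGetD s (c.getD (pvNIdx L a) 0) 0
          < PySem.List.pyGetD s (c.getD (pvNIdx L b) 0) 0) := by
        rw [hsa, hsb]; intro hh; exact hlt (by exact_mod_cast hh)
      have hcondN : ¬ ((PySem.List.pyGetD m (c.getD (pvNIdx L a) 0) []).length
          < (PySem.List.pyGetD m (c.getD (pvNIdx L b) 0) []).length) := by
        rw [hmaL, hmbL]; exact hlt
      have huA : pvUnionSets p s a b =
          (PySem.List.pySetD (pvFindSet (pvFindSet p.length p a).2.length (pvFindSet p.length p a).2 b).2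
            (c.getD (pvNIdx L b) 0) (c.getD (pvNIdx L a) 0),
           PySem.List.pySetD s (c.getD (pvNIdx L a) 0)
            (PySem.List.pyGetD s (c.getD (pvNIdx L a) 0) 0 + PySem.List.pyGetD s (c.getD (pvNIdx L b) 0) 0)) := by
        simp only [pvUnionSets]
        rw [hra, hrb, if_pos heq, if_neg hcondI]
      have hinvU := pv_union_all hinv2 hcra.1 hcra.2 hcrb.1 hcrb.2 hroa hrob heq
      obtain ⟨hval, hinv3⟩ := pv_append_val (a := a) hinvU ha
      refine ⟨_, _,
        pvRelocate (c.getD (pvNIdx L a) 0) c (PySem.List.pyGetD m (c.getD (pvNIdx L b) 0) []),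
        PySem.List.pySetD (PySem.List.pySetD m (c.getD (pvNIdx L a) 0)
          (PySem.List.pyGetD m (c.getD (pvNIdx L a) 0) [] ++ PySem.List.pyGetD m (c.getD (pvNIdx L b) 0) []))
          (c.getD (pvNIdx L b) 0) [],
        _, by simp only [pvStepA]; rw [huA], ?_, ?_⟩
      · simp only [pvStepB]
        rw [hga, hgb, if_pos heq, if_neg hcondN]
        show (pvRelocate (c.getD (pvNIdx L a) 0) c (PySem.List.pyGetD m (c.getD (pvNIdx L b) 0) []),
          PySem.List.pySetD (PySem.List.pySetD m (c.getD (pvNIdx L a) 0)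
            (PySem.List.pyGetD m (c.getD (pvNIdx L a) 0) [] ++ PySem.List.pyGetD m (c.getD (pvNIdx L b) 0) []))
            (c.getD (pvNIdx L b) 0) [],
          res ++ [((PySem.List.pyGetD
            (PySem.List.pySetD (PySem.List.pySetD m (c.getD (pvNIdx L a) 0)
              (PySem.List.pyGetD m (c.getD (pvNIdx L a) 0) [] ++ PySem.List.pyGetD m (c.getD (pvNIdx L b) 0) []))
              (c.getD (pvNIdx L b) 0) [])
            (PySem.List.pyGetD (pvRelocate (c.getD (pvNIdx L a) 0) c (PySem.List.pyGetD m (c.getD (pvNIdx L b) 0) [])) a 0)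
            []).length : Int)]) = _
        rw [hval, pv_pyGetD _ hinvU.hcl ha 0,
          pv_getD_bridge _ hinvU.hml (hinvU.hcr _ hna).1 (hinvU.hcr _ hna).2 []]
      · exact hinv3

theorem pv_range_getD (N : Int) {j : Nat} (hj : j < (N + 1).toNat) :
    (PySem.List.pyRange 0 (N + 1) 1).getD j 0 = (j : Int) := by
  have hlen : (PySem.List.pyRange 0 (N + 1) 1).length = (N + 1).toNat := by
    rw [PySem.List.length_pyRange_one]; simp
  rw [List.getD_eq_getElem _ _ (by rw [hlen]; exact hj), PySem.List.getElem_pyRange_one]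
  simp

theorem pv_cnt_init (N : Int) {j : Nat} (hj : j < (N + 1).toNat) :
    pvCnt (N + 1).toNat (PySem.List.pyRange 0 (N + 1) 1) ((j : Nat) : Int) = 1 := by
  unfold pvCnt
  have h1 : (List.range (N + 1).toNat).countP
        (fun j' => decide ((PySem.List.pyRange 0 (N + 1) 1).getD j' 0 = (j : Int)))
      = (List.range (N + 1).toNat).countP (fun j' => j' == j) := by
    apply List.countP_congr
    intro x hx
    rw [pv_range_getD N (List.mem_range.mp hx)]
    simp
  rw [h1, show (List.range (N + 1).toNat).countP (fun j' => j' == j) = (List.range (N + 1).toNat).count j from rfl,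
    List.count_eq_one_of_mem List.nodup_range (List.mem_range.mpr hj)]

theorem pv_inv_init (N : Int) :
    pvInv (N + 1).toNat (PySem.List.pyRange 0 (N + 1) 1) (PySem.List.pyRepeat [(1 : Int)] (N + 1))
      (PySem.List.pyRange 0 (N + 1) 1) ((PySem.List.pyRange 0 (N + 1) 1).map (fun x => [x])) := by
  have hlen : (PySem.List.pyRange 0 (N + 1) 1).length = (N + 1).toNat := by
    rw [PySem.List.length_pyRange_one]; simp
  have hslen : (PySem.List.pyRepeat [(1 : Int)] (N + 1)).length = (N + 1).toNat := by
    rw [PySem.List.pyRepeat_singleton, List.length_replicate]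
  have hsget : ∀ j < (N + 1).toNat, (PySem.List.pyRepeat [(1 : Int)] (N + 1)).getD j 0 = 1 := by
    intro j hj
    rw [PySem.List.pyRepeat_singleton, List.getD_eq_getElem _ _ (by rw [List.length_replicate]; exact hj),
      List.getElem_replicate]
  have hmget : ∀ g < (N + 1).toNat, ((PySem.List.pyRange 0 (N + 1) 1).map (fun x => [x])).getD g [] = [(g : Int)] := by
    intro g hg
    rw [List.getD_eq_getElem _ _ (by rw [List.length_map, hlen]; exact hg), List.getElem_map]
    congr 1
    rw [← pv_range_getD N hg, List.getD_eq_getElem _ _ (by rw [hlen]; exact hg)]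
  refine ⟨hlen, hslen, hlen, by rw [List.length_map]; exact hlen, ?_, ?_, ?_, ?_, ?_, ?_, ?_, ?_, ?_⟩
  · intro j hj; rw [pv_range_getD N hj]; constructor <;> omega
  · intro j hj; rw [pv_range_getD N hj, Int.toNat_natCast, pv_range_getD N hj]
  · intro j hj; rw [pv_range_getD N hj]; constructor <;> omega
  · intro j hj; rw [pv_range_getD N hj, Int.toNat_natCast, pv_range_getD N hj]
  · intro j hj; rw [pv_range_getD N hj, Int.toNat_natCast, pv_range_getD N hj]
  · intro j hj
    refine ⟨0, ?_, ?_⟩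
    · rw [pv_range_getD N hj, pv_cnt_init N hj]
    · simp only [pvIter]
      rw [pv_range_getD N hj, Int.toNat_natCast]
  · intro j hj
    rw [pv_range_getD N hj, Int.toNat_natCast, hsget j hj, pv_cnt_init N hj]
    norm_num
  · intro g hg x
    rw [hmget g hg]
    simp only [List.mem_singleton]
    constructor
    · rintro rfl
      exact ⟨by omega, by simpa using hg, by rw [Int.toNat_natCast, pv_range_getD N hg]⟩
    · rintro ⟨hx0, hxl, hcx⟩
      rw [pv_range_getD N hxl] at hcx
      omega
  · intro g hg
    rw [hmget g hg]
    exact List.nodup_singleton _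

theorem pv_fold {L : Nat} :
    ∀ (fs : List (Int × Int)) (p s c : List Int) (m : List (List Int)) (res : List Int),
    pvInv L p s c m →
    (∀ ab ∈ fs, PySem.Raise.InRange L ab.1 ∧ PySem.Raise.InRange L ab.2) →
    (fs.foldl pvStepA (p, s, res)).2.2 = (fs.foldl pvStepB (c, m, res)).2.2 := by
  intro fs
  induction fs with
  | nil => intro p s c m res _ _; rfl
  | cons ab fs ih =>
    intro p s c m res hinv hpre
    obtain ⟨a, b⟩ := ab
    obtain ⟨p', s', c', m', v, hA, hB, hinv'⟩ :=
      pv_step (res := res) hinv (hpre (a, b) List.mem_cons_self).1 (hpre (a, b) List.mem_cons_self).2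
    rw [List.foldl_cons, List.foldl_cons, hA, hB]
    exact ih p' s' c' m' (res ++ [v]) hinv' (fun x hx => hpre x (List.mem_cons_of_mem _ hx))

theorem calculate_friend_circle_size_spec : Claim_equal_calculate_friend_circle_size := by
  intro N fs _ hpre
  unfold Spec_calculate_friend_circle_size calculate_friend_circle_size calculate_friend_circle_size_alt
  exact pv_fold fs _ _ _ _ [] (pv_inv_init N) hpre
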